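-- pv_equiv track=rewrite | github.com/lachlanmcintosh/PRISMM | prismm/run_build_trees_and_timings/get_annotated_trees_and_timings.py | generate_path_code
-- ===== SOURCE A (Python) =====
-- from typing import Dict, List, Tuple, Any
--
-- def generate_path_code(path: List[str]) -> str:
--     """
--     This function takes a list of codes and generates a path code string.
--     It treats "A" as an increment to a count, and "GD" as a delimiter to separate
--     chunks of counts with "G".
--
--     Args:
--     path: A list of string codes.
--
--     Returns:
--     A string representing the path code.
--     """
--     path_code = ""
--     count = 0
--
--     for code in path:
--         if code == "A":
--             count += 1
--         elif code == "GD":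
--             path_code += str(count)
--             count = 0
--             path_code += "G"
--
--     path_code += str(count)
--     return path_code
-- ===== SOURCE B (Python) =====
-- def _split_groups(path):
--     """Split path into groups delimited by "GD"."""
--     groups = []
--     current = []
--     for code in path:
--         if code == "GD":
--             groups.append(current)
--             current = []
--         else:
--             current.append(code)
--     groups.append(current)
--     return groups
--
--
-- def _count_A(group):
--     return sum(1 for c in group if c == "A")
--
--
-- def generate_path_code(path):
--     groups = _split_groups(path)
--     return "G".join(str(_count_A(g)) for g in groups)
-- ===== Notes on version B (the rewrite author's own statement) =====
-- stated objective: alternative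
-- what changed: Replaced A's single accumulate-and-emit pass (running count plus string concatenation) with a three-phase pipeline: recursively split the path into groups at each "GD", count the "A" entries of each group, and "G".join the counts.
import Mathlib
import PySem

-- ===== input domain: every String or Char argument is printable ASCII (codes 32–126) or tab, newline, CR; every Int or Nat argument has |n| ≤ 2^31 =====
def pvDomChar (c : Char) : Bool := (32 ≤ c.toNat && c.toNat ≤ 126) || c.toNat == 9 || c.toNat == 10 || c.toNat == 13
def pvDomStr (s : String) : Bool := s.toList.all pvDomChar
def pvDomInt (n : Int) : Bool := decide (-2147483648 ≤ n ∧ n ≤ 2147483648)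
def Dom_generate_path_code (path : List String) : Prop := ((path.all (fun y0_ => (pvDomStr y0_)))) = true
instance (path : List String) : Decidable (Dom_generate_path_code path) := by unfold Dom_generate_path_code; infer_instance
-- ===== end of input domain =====

-- B replaces A's single accumulate-and-emit pass by a split-into-groups → count-"A"s → "G"-join pipeline (alternative decomposition, same asymptotic cost).


-- ===== PORT A =====
def generate_path_code (path : List String) : String :=
  let r := path.foldl (fun (s : String × Int) code =>
      if code = "A" then (s.1, s.2 + 1)
      else if code = "GD" then (s.1 ++ PySem.Int.toStr s.2 ++ "G", (0 : Int))
      else s) ("", (0 : Int))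
  r.1 ++ PySem.Int.toStr r.2

-- ===== PORT B =====
-- Source B's _split_groups: one pass, closing the current group at each "GD"
def pvSplitGroups (path : List String) : List (List String) :=
  let r := path.foldl (fun (s : List (List String) × List String) code =>
      if code = "GD" then (s.1 ++ [s.2], ([] : List String))
      else (s.1, s.2 ++ [code])) (([] : List (List String)), ([] : List String))
  r.1 ++ [r.2]

-- Source B's _count_A: sum(1 for c in group if c == "A")
def pvCountA (group : List String) : Int :=
  ((group.filter (fun c => c = "A")).length : Int)

def generate_path_code_alt (path : List String) : String :=
  PySem.Str.join "G" ((pvSplitGroups path).map (fun g => PySem.Int.toStr (pvCountA g)))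

-- ===== PRECONDITION & SPEC =====
def Spec_generate_path_code (path : List String) (out : String) : Prop := out = generate_path_code_alt path
instance (path : List String) (out : String) : Decidable (Spec_generate_path_code path out) := by unfold Spec_generate_path_code; infer_instance

-- ===== CLAIM (what is proved, stated in full; the proofs are below) =====
def Claim_equal_generate_path_code : Prop := ∀ (path : List String), Dom_generate_path_code path → Spec_generate_path_code path (generate_path_code path)

-- ===== LEMMAS AND PROOFS =====

-- recursive characterisation of pvSplitGroups, used only by the proofs
def pvSplitRec : List String → List (List String)
  | [] => [[]]
  | head :: rest =>
    if head = "GD" then [] :: pvSplitRec rest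
    else match pvSplitRec rest with
      | g :: gs => (head :: g) :: gs
      | [] => [[head]]

-- prepend cur to the first group
def pvConsFirst (cur : List String) : List (List String) → List (List String)
  | [] => [cur]
  | g :: gs => (cur ++ g) :: gs

-- the "G"-join of the group counts, with the pending count c added into the first group
def pvJ : Int → List (List String) → String
  | c, [] => PySem.Int.toStr c
  | c, [g] => PySem.Int.toStr (c + pvCountA g)
  | c, g :: g' :: gs => PySem.Int.toStr (c + pvCountA g) ++ "G" ++ pvJ 0 (g' :: gs)

lemma pvSplitRec_ne_nil (path : List String) : pvSplitRec path ≠ [] := by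
  cases path with
  | nil => simp [pvSplitRec]
  | cons h t =>
    simp only [pvSplitRec]
    split_ifs
    · simp
    · cases pvSplitRec t <;> simp

lemma pvSplitRec_cons_shape (rest : List String) :
    ∃ g gs, pvSplitRec rest = g :: gs := by
  cases h : pvSplitRec rest with
  | nil => exact absurd h (pvSplitRec_ne_nil rest)
  | cons a b => exact ⟨a, b, rfl⟩

-- the fold of pvSplitGroups, started at (acc, cur), is acc followed by pvSplitRec with cur prepended to the first group
lemma pvSplitGroups_fold_eq : ∀ (path : List String) (acc : List (List String)) (cur : List String),
    (let r := path.foldl (fun (s : List (List String) × List String) code =>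
        if code = "GD" then (s.1 ++ [s.2], ([] : List String))
        else (s.1, s.2 ++ [code])) (acc, cur)
     r.1 ++ [r.2]) = acc ++ pvConsFirst cur (pvSplitRec path) := by
  intro path
  induction path with
  | nil => intro acc cur; simp [pvSplitRec, pvConsFirst]
  | cons code rest ih =>
    intro acc cur
    obtain ⟨g, gs, hg⟩ := pvSplitRec_cons_shape rest
    by_cases hGD : code = "GD"
    · subst hGD
      simp only [List.foldl_cons, String.reduceEq, reduceIte]
      rw [ih (acc ++ [cur]) [], hg]
      rw [show pvSplitRec ("GD" :: rest) = [] :: pvSplitRec rest from by simp [pvSplitRec], hg]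
      simp [pvConsFirst]
    · simp only [List.foldl_cons]
      rw [if_neg hGD, ih acc (cur ++ [code]), hg]
      rw [show pvSplitRec (code :: rest) = (code :: g) :: gs from by simp [pvSplitRec, hGD, hg]]
      simp [pvConsFirst]

lemma pvSplitGroups_eq_rec (path : List String) : pvSplitGroups path = pvSplitRec path := by
  obtain ⟨g, gs, hg⟩ := pvSplitRec_cons_shape path
  unfold pvSplitGroups
  rw [pvSplitGroups_fold_eq path [] [], hg]
  simp [pvConsFirst]

lemma pvCountA_cons (x : String) (g : List String) :
    pvCountA (x :: g) = (if x = "A" then 1 else 0) + pvCountA g := by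
  by_cases h : x = "A" <;> simp [pvCountA, h] <;> omega

lemma pvJ_eq_join : ∀ (gs : List (List String)) (g : List String) (c : Int),
    pvJ c (g :: gs) = PySem.Str.join "G"
      (PySem.Int.toStr (c + pvCountA g) :: gs.map (fun h => PySem.Int.toStr (pvCountA h))) := by
  intro gs
  induction gs with
  | nil =>
    intro g c
    apply String.toList_inj.mp
    simp [pvJ, PySem.Str.join, PySem.Chars.join_singleton]
  | cons g' gs ih =>
    intro g c
    apply String.toList_inj.mp
    rw [show pvJ c (g :: g' :: gs) = PySem.Int.toStr (c + pvCountA g) ++ "G" ++ pvJ 0 (g' :: gs) from rfl,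
        ih g' 0, zero_add]
    simp [PySem.Str.join, PySem.Chars.join_cons_cons]

-- main invariant: A's fold started at (pc, c) produces pc followed by pvJ c of B's groups
lemma pv_fold_eq : ∀ (path : List String) (pc : String) (c : Int),
    (let r := path.foldl (fun (s : String × Int) code =>
        if code = "A" then (s.1, s.2 + 1)
        else if code = "GD" then (s.1 ++ PySem.Int.toStr s.2 ++ "G", (0 : Int))
        else s) (pc, c)
     r.1 ++ PySem.Int.toStr r.2) = pc ++ pvJ c (pvSplitRec path) := by
  intro path
  induction path with
  | nil => intro pc c; simp [pvSplitRec, pvJ, pvCountA]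
  | cons code rest ih =>
    intro pc c
    obtain ⟨g, gs, hg⟩ := pvSplitRec_cons_shape rest
    by_cases hA : code = "A"
    · subst hA
      simp only [List.foldl_cons, String.reduceEq, reduceIte]
      have hgrp : pvSplitRec ("A" :: rest) = ("A" :: g) :: gs := by
        simp [pvSplitRec, hg]
      rw [ih pc (c + 1), hg, hgrp]
      congr 1
      cases gs with
      | nil =>
        simp only [pvJ]
        rw [pvCountA_cons]
        simp only [reduceIte]
        rw [show c + (1 + pvCountA g) = c + 1 + pvCountA g from by ring]
      | cons g2 gs2 =>
        simp only [pvJ]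
        rw [pvCountA_cons]
        simp only [reduceIte]
        rw [show c + (1 + pvCountA g) = c + 1 + pvCountA g from by ring]
    · by_cases hGD : code = "GD"
      · subst hGD
        simp only [List.foldl_cons, String.reduceEq, reduceIte]
        have hgrp : pvSplitRec ("GD" :: rest) = [] :: pvSplitRec rest := by
          simp [pvSplitRec]
        rw [ih (pc ++ PySem.Int.toStr c ++ "G") 0, hgrp, hg]
        rw [show pvJ c ([] :: g :: gs) = PySem.Int.toStr (c + pvCountA []) ++ "G" ++ pvJ 0 (g :: gs) from rfl]
        rw [show pvCountA [] = 0 from rfl, add_zero]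
        simp [String.append_assoc]
      · simp only [List.foldl_cons]
        rw [if_neg hA, if_neg hGD]
        have hgrp : pvSplitRec (code :: rest) = (code :: g) :: gs := by
          simp [pvSplitRec, hGD, hg]
        rw [ih pc c, hg, hgrp]
        have hc : pvCountA (code :: g) = pvCountA g := by
          rw [pvCountA_cons, if_neg hA]; ring
        congr 1
        cases gs <;> simp only [pvJ, hc]

-- ===== VERDICT (by name: the statement is the Claim_ definition above) =====
theorem generate_path_code_spec : Claim_equal_generate_path_code := by
  intro path _
  unfold Spec_generate_path_code generate_path_code generate_path_code_alt
  rw [pv_fold_eq path "" 0, pvSplitGroups_eq_rec path]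
  obtain ⟨g, gs, hg⟩ := pvSplitRec_cons_shape path
  rw [hg, pvJ_eq_join gs g 0, zero_add]
  apply String.toList_inj.mp
  simp [List.map]
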